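-- pv_equiv track=rewrite | github.com/samspillers/Deep-RL-Dominos | domino.py | id_to_nums
-- ===== SOURCE A (Python) =====
-- def id_to_nums(domino_id: int, num_max) -> (int, int):
--     assert 0 <= domino_id < ((num_max + 1) * (num_max + 2) / 2) and num_max >= 0
--     id_max = int((num_max + 1) * (num_max + 2) / 2) - 1
--     i = 0
--     while domino_id < id_max - i:
--         id_max -= i + 1
--         i += 1
--     return num_max - i, domino_id - id_max + num_max
-- ===== SOURCE B (Python) =====
-- import math
--
-- def id_to_nums(domino_id: int, num_max) -> (int, int):
--     assert 0 <= domino_id < ((num_max + 1) * (num_max + 2) / 2) and num_max >= 0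
--     id_max = int((num_max + 1) * (num_max + 2) / 2) - 1
--     r = id_max - domino_id
--     i = (math.isqrt(8 * r + 1) - 1) // 2
--     return num_max - i, domino_id - (id_max - i * (i + 1) // 2) + num_max
-- ===== Notes on version B (the rewrite author's own statement) =====
-- stated objective: faster
-- what changed: A's while loop that subtracts row lengths one by one is replaced by a closed-form inverse triangular number computed with math.isqrt, finding the row index in O(1).
import Mathlib
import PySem

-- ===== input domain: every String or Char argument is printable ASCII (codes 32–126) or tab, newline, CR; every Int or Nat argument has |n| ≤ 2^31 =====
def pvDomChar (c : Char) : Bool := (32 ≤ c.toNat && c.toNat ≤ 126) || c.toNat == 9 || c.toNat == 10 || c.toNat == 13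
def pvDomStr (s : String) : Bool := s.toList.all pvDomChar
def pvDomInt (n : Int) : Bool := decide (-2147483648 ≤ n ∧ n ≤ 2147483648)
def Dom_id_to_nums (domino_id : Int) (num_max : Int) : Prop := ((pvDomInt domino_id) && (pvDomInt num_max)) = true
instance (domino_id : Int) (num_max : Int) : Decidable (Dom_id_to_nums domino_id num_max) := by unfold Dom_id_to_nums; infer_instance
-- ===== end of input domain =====

-- B replaces A's O(num_max) row-by-row subtraction loop with a closed-form inverse
-- triangular number via integer square root (O(1) apart from the isqrt).

-- ===== PORT A =====
-- Python's `(num_max+1)*(num_max+2)/2` is true division: the exact quotient rounded to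
-- the nearest IEEE double (ties to even).  For 0 ≤ n < 2^63 this helper returns the
-- integer value of that double times 2 (i.e. round-to-double of n; halving a double by 2
-- is exact, and rounding commutes with the exact scaling by 2).  Exact on 0 ≤ n < 2^63.
def pvRoundDouble (n : Int) : Int :=
  let m := n.toNat
  if m < 2 ^ 53 then n
  else
    let e := m.log2 + 1 - 53
    let q := m / 2 ^ e
    let rem := m % 2 ^ e
    let half := 2 ^ (e - 1)
    let q' := if rem > half ∨ (rem = half ∧ q % 2 = 1) then q + 1 else q
    ((q' * 2 ^ e : Nat) : Int)

-- `int((num_max+1)*(num_max+2)/2)`: the double is an exact nonnegative integer here,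
-- so int() truncation is the integer itself.
def pvIdMaxInit (num_max : Int) : Int :=
  pvRoundDouble ((num_max + 1) * (num_max + 2)) / 2

-- A's while loop; the Python variable i starts at 0 and only increments, so it is a Nat.
def loopA (domino_id : Int) (id_max : Int) (i : Nat) : Int × Nat :=
  if h : domino_id < id_max - i then loopA domino_id (id_max - (i + 1)) (i + 1)
  else (id_max, i)
termination_by (id_max - i - domino_id).toNat
decreasing_by omega

def id_to_nums (domino_id : Int) (num_max : Int) : List Int :=
  let id_max := pvIdMaxInit num_max - 1
  let p := loopA domino_id id_max 0
  [num_max - p.2, domino_id - p.1 + num_max]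

-- ===== PORT B =====
def id_to_nums_alt (domino_id : Int) (num_max : Int) : List Int :=
  let id_max := pvIdMaxInit num_max - 1
  let r := id_max - domino_id
  -- math.isqrt(8*r+1): r ≥ 0 whenever the assert passes (Pre_), so Nat.sqrt is exact here
  let i : Nat := (Nat.sqrt (8 * r + 1).toNat - 1) / 2
  [num_max - i, domino_id - (id_max - (i * (i + 1) / 2 : Nat)) + num_max]

-- ===== PRECONDITION & SPEC =====
-- Pre_ is exactly A's assert: 0 ≤ domino_id < (num_max+1)*(num_max+2)/2 (Python float
-- comparison; the float's value is the integer pvIdMaxInit) and num_max ≥ 0.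
def Pre_id_to_nums (domino_id : Int) (num_max : Int) : Prop :=
  0 ≤ domino_id ∧ domino_id < pvIdMaxInit num_max ∧ 0 ≤ num_max
instance (domino_id : Int) (num_max : Int) : Decidable (Pre_id_to_nums domino_id num_max) := by
  unfold Pre_id_to_nums; infer_instance

def pvWitness_id_to_nums : Int × Int := (4, 2)

def Spec_id_to_nums (domino_id : Int) (num_max : Int) (out : List Int) : Prop := out = id_to_nums_alt domino_id num_max
instance (domino_id : Int) (num_max : Int) (out : List Int) : Decidable (Spec_id_to_nums domino_id num_max out) := by unfold Spec_id_to_nums; infer_instance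

-- ===== CLAIM (what is proved, stated in full; the proofs are below) =====
def Claim_equal_id_to_nums : Prop := ∀ (domino_id : Int) (num_max : Int), Dom_id_to_nums domino_id num_max → Pre_id_to_nums domino_id num_max → Spec_id_to_nums domino_id num_max (id_to_nums domino_id num_max)

-- ===== LEMMAS AND PROOFS =====

def tri (n : Nat) : Nat := n * (n + 1) / 2

theorem tri_succ (n : Nat) : tri (n + 1) = tri n + (n + 1) := by
  unfold tri
  have h : (n + 1) * (n + 1 + 1) = n * (n + 1) + 2 * (n + 1) := by ring
  omega

theorem tri_two (n : Nat) : 2 * tri n = n * (n + 1) := by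
  unfold tri
  obtain ⟨c, hc⟩ := Nat.even_mul_succ_self n
  omega

theorem tri_mono {a b : Nat} (h : a ≤ b) : tri a ≤ tri b := by
  unfold tri
  exact Nat.div_le_div_right (Nat.mul_le_mul h (by omega))

-- inverse triangular number via Nat.sqrt
theorem sqrt_tri (r : Nat) :
    tri ((Nat.sqrt (8 * r + 1) - 1) / 2) ≤ r ∧ r < tri ((Nat.sqrt (8 * r + 1) - 1) / 2 + 1) := by
  have h1 : Nat.sqrt (8 * r + 1) * Nat.sqrt (8 * r + 1) ≤ 8 * r + 1 := by
    simpa [pow_two] using Nat.sqrt_le' (8 * r + 1)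
  have h2 : 8 * r + 1 < (Nat.sqrt (8 * r + 1) + 1) * (Nat.sqrt (8 * r + 1) + 1) := by
    simpa [pow_two, Nat.succ_eq_add_one] using Nat.lt_succ_sqrt' (8 * r + 1)
  have hs1 : 1 ≤ Nat.sqrt (8 * r + 1) := Nat.sqrt_pos.mpr (by omega)
  set s := Nat.sqrt (8 * r + 1) with hs
  set k := (s - 1) / 2 with hk
  have hks : 2 * k + 1 ≤ s ∧ s ≤ 2 * k + 2 := by omega
  have hlo : (2 * k + 1) * (2 * k + 1) ≤ 8 * r + 1 :=
    le_trans (Nat.mul_le_mul hks.1 hks.1) h1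
  have hhi : 8 * r + 1 < (2 * k + 3) * (2 * k + 3) :=
    lt_of_lt_of_le h2 (Nat.mul_le_mul (by omega) (by omega))
  have e1 : (2 * k + 1) * (2 * k + 1) = 4 * (k * (k + 1)) + 1 := by ring
  have e2 : (2 * k + 3) * (2 * k + 3) = 4 * ((k + 1) * (k + 1 + 1)) + 1 := by ring
  have e3 := tri_two k
  have e4 := tri_two (k + 1)
  omega

-- characterisation of A's loop: starting at (E, i), it stops after exactly n iterations
theorem loopA_eq (n : Nat) : ∀ (i : Nat) (E d : Int),
    (∀ j : Nat, i ≤ j → j < i + n → d < E - ((tri j : Int) - tri i) - j) →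
    E - ((tri (i + n) : Int) - tri i) - (i + n) ≤ d →
    loopA d E i = (E - ((tri (i + n) : Int) - tri i), i + n) := by
  induction n with
  | zero =>
    intro i E d _ hstop
    rw [loopA]
    have : ¬ d < E - i := by simp at hstop; omega
    simp [this]
  | succ n ih =>
    intro i E d hrun hstop
    have hlt : d < E - i := by
      have := hrun i le_rfl (by omega)
      simpa using this
    rw [loopA]
    simp only [hlt, dif_pos]
    have hsh : ∀ j : Nat, (tri j : Int) - tri (i + 1) = (tri j : Int) - tri i - (i + 1) := by
      intro j
      have := tri_succ i
      push_cast [this]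
      ring
    have heq : (i + 1) + n = i + (n + 1) := by omega
    have h1 : ∀ j : Nat, i + 1 ≤ j → j < (i + 1) + n →
        d < (E - (i + 1)) - ((tri j : Int) - tri (i + 1)) - j := by
      intro j hj1 hj2
      have := hrun j (by omega) (by omega)
      rw [hsh j]; omega
    have h2 : (E - (i + 1)) - ((tri ((i + 1) + n) : Int) - tri (i + 1)) - ((i + 1) + n) ≤ d := by
      rw [hsh, heq]
      push_cast [heq] at hstop ⊢
      omega
    rw [ih (i + 1) (E - (i + 1)) d h1 h2]
    simp only [Prod.mk.injEq]
    constructor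
    · rw [heq, hsh]; ring
    · omega

-- ===== VERDICT (by name: the statement is the Claim_ definition above) =====
theorem id_to_nums_spec : Claim_equal_id_to_nums := by
  intro d m _hdom hpre
  obtain ⟨hd0, hdlt, hm⟩ := hpre
  unfold Spec_id_to_nums id_to_nums id_to_nums_alt
  set E : Int := pvIdMaxInit m - 1 with hE
  obtain ⟨r, hrI⟩ : ∃ r : Nat, (r : Int) = E - d := ⟨(E - d).toNat, by omega⟩
  have hidx : (8 * (E - d) + 1).toNat = 8 * r + 1 := by omega
  set k : Nat := (Nat.sqrt (8 * r + 1) - 1) / 2 with hk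
  have hst := sqrt_tri r
  rw [← hk] at hst
  obtain ⟨hlo, hhi⟩ := hst
  have hloop : loopA d E 0 = (E - ((tri (0 + k) : Int) - tri 0), 0 + k) := by
    apply loopA_eq
    · intro j _ hjk
      simp only [Nat.zero_add] at hjk
      have h1 : tri (j + 1) ≤ tri k := tri_mono (by omega)
      have h2 : tri (j + 1) = tri j + (j + 1) := tri_succ j
      have h3 : (tri j : Int) + j + 1 ≤ r := by omega
      have h0 : tri 0 = 0 := rfl
      rw [h0]; omega
    · simp only [Nat.zero_add]
      have h2 : tri (k + 1) = tri k + (k + 1) := tri_succ k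
      have h3 : (r : Int) ≤ (tri k : Int) + k := by omega
      have h0 : tri 0 = 0 := rfl
      rw [h0]; omega
  simp only [hloop, hidx, Nat.zero_add]
  have htri : k * (k + 1) / 2 = tri k := rfl
  rw [htri]
  have h0 : (tri 0 : Int) = 0 := rfl
  rw [h0]
  simp only [List.cons.injEq]
  refine ⟨by ring, by ring, trivial⟩
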